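-- pv_equiv track=rewrite | github.com/Janeho454199/my_leetcode | 力扣周赛/84/6141-合并相似的物品.py | mergeSimilarItems
-- ===== SOURCE A (Python) =====
-- import collections
-- from typing import List
--
-- def mergeSimilarItems(items1: List[List[int]], items2: List[List[int]]) -> List[List[int]]:
--     res = []
--     hash_dict = collections.defaultdict(int)
--
--     for item in items1:
--         hash_dict[item[0]] += item[1]
--
--     for item in items2:
--         hash_dict[item[0]] += item[1]
--
--     hash_dict = sorted(hash_dict.items(), key=lambda x: x[0])
--
--     for i in hash_dict:
--         res.append([i[0], i[1]])
--
--     return res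
-- ===== SOURCE B (Python) =====
-- from typing import List
--
-- def mergeSimilarItems(items1: List[List[int]], items2: List[List[int]]) -> List[List[int]]:
--     merged = sorted(items1 + items2, key=lambda p: p[0])
--     res = []
--     i, n = 0, len(merged)
--     while i < n:
--         k = merged[i][0]
--         s = 0
--         while i < n and merged[i][0] == k:
--             s += merged[i][1]
--             i += 1
--         res.append([k, s])
--     return res
-- ===== Notes on version B (the rewrite author's own statement) =====
-- stated objective: alternative
-- what changed: Replaces the defaultdict accumulation followed by sorting the dict items with a sort of the concatenated list by key and a single adjacency-driven pass summing consecutive equal keys; no dictionary is maintained.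
import Mathlib
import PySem

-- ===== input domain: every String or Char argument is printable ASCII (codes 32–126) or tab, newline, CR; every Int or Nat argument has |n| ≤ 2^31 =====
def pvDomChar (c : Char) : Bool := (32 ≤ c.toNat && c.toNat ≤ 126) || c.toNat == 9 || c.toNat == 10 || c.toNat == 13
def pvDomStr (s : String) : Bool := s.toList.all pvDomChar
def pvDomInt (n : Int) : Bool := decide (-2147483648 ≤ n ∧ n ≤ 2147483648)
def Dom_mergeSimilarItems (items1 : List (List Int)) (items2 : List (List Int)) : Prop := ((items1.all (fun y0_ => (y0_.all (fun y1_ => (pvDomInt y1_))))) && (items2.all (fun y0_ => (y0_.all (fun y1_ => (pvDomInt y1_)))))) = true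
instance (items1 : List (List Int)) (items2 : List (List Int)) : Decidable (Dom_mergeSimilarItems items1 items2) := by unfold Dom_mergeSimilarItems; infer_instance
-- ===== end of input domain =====

-- B replaces A's defaultdict accumulation + sort of the dict items by a sort of the
-- concatenated list followed by one adjacency-driven grouping pass (objective: alternative).

-- item[0] / item[1] (both Pythons); exact under Pre_ (every item has length ≥ 2)
def pvKey (it : List Int) : Int := PySem.List.pyGetD it 0 0
def pvVal (it : List Int) : Int := PySem.List.pyGetD it 1 0

-- ===== PORT A =====
def mergeSimilarItems (items1 : List (List Int)) (items2 : List (List Int)) : List (List Int) :=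
  let d1 : PySem.Dict Int Int :=
    items1.foldl (fun d item => d.modify (pvKey item) 0 (· + pvVal item)) PySem.Dict.empty
  let d2 : PySem.Dict Int Int :=
    items2.foldl (fun d item => d.modify (pvKey item) 0 (· + pvVal item)) d1
  let hashDict := PySem.List.sorted d2.items (fun x => x.1) false
  hashDict.foldl (fun res i => res ++ [[i.1, i.2]]) []

-- ===== PORT B =====
-- outer while loop: each step consumes one run of equal keys from the sorted list
def mergeRuns : List (List Int) → List (List Int)
  | [] => []
  | item :: rest =>
    let k := pvKey item
    let s := pvVal item + ((rest.takeWhile (fun p => pvKey p == k)).map pvVal).sum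
    [k, s] :: mergeRuns (rest.dropWhile (fun p => pvKey p == k))
termination_by l => l.length
decreasing_by
  have := List.length_dropWhile_le (fun p => pvKey p == pvKey item) rest
  simp; omega

def mergeSimilarItems_alt (items1 : List (List Int)) (items2 : List (List Int)) : List (List Int) :=
  mergeRuns (PySem.List.sorted (items1 ++ items2) (fun p => pvKey p) false)

-- ===== PRECONDITION & SPEC =====
-- Pre_ excludes exactly the inputs with an item of fewer than two entries, on which A raises IndexError.
def Pre_mergeSimilarItems (items1 : List (List Int)) (items2 : List (List Int)) : Prop :=
  ∀ it ∈ items1 ++ items2, 2 ≤ it.length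
instance (items1 : List (List Int)) (items2 : List (List Int)) : Decidable (Pre_mergeSimilarItems items1 items2) := by unfold Pre_mergeSimilarItems; infer_instance

def pvWitness_mergeSimilarItems : List (List Int) × List (List Int) := ([[1, 2], [3, 4]], [[1, 5]])

def Spec_mergeSimilarItems (items1 : List (List Int)) (items2 : List (List Int)) (out : List (List Int)) : Prop := out = mergeSimilarItems_alt items1 items2
instance (items1 : List (List Int)) (items2 : List (List Int)) (out : List (List Int)) : Decidable (Spec_mergeSimilarItems items1 items2 out) := by unfold Spec_mergeSimilarItems; infer_instance

-- ===== CLAIM (what is proved, stated in full; the proofs are below) =====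
def Claim_equal_mergeSimilarItems : Prop := ∀ (items1 : List (List Int)) (items2 : List (List Int)), Dom_mergeSimilarItems items1 items2 → Pre_mergeSimilarItems items1 items2 → Spec_mergeSimilarItems items1 items2 (mergeSimilarItems items1 items2)

-- ===== LEMMAS AND PROOFS =====

-- A's accumulation loop: the dict value at k is the sum of the values of the items keyed k
theorem getD_foldl_modify_sum (l : List (List Int)) (d : PySem.Dict Int Int) (k : Int) :
    (l.foldl (fun d it => d.modify (pvKey it) 0 (· + pvVal it)) d).getD k 0
      = d.getD k 0 + ((l.filter (fun it => pvKey it == k)).map pvVal).sum := by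
  induction l generalizing d with
  | nil => simp
  | cons x t ih =>
    rw [List.foldl_cons, ih, PySem.Dict.getD_modify, List.filter_cons]
    by_cases h : pvKey x = k
    · simp [h]; ring
    · simp [h, Ne.symm h]

-- in a ≤-sorted list bounded below by k0, the items keyed k0 are exactly the leading run
theorem filter_run (k0 : Int) (l : List (List Int))
    (hp : l.Pairwise (fun a b => pvKey a ≤ pvKey b)) (hlb : ∀ p ∈ l, k0 ≤ pvKey p) :
    l.filter (fun p => pvKey p == k0) = l.takeWhile (fun p => pvKey p == k0) := by
  induction l with
  | nil => rfl
  | cons x t ih =>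
    rcases List.pairwise_cons.mp hp with ⟨hx, ht⟩
    by_cases h : pvKey x = k0
    · rw [List.filter_cons, List.takeWhile_cons]
      simp only [h, BEq.rfl, if_pos]
      rw [ih ht (fun p hp' => h ▸ hx p hp')]
    · have hk0 : k0 < pvKey x := lt_of_le_of_ne (hlb x (by simp)) (Ne.symm h)
      have hnone : ∀ p ∈ t, ¬ (pvKey p == k0) = true := by
        intro p hp' hb
        have := hx p hp'
        have : pvKey p = k0 := by simpa using hb
        omega
      have hb : (pvKey x == k0) = false := by simp [h]
      rw [List.filter_cons, List.takeWhile_cons, hb]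
      simp [List.filter_eq_nil_iff.mpr hnone]

theorem discard_ofList_run (k0 : Int) (rk dk : List Int)
    (h1 : ∀ x ∈ rk, x = k0) (h2 : k0 ∉ dk) :
    PySem.Set.discard (PySem.Set.ofList (rk ++ dk)) k0 = PySem.Set.ofList dk := by
  induction rk with
  | nil =>
    simp only [List.nil_append]
    have : ∀ y ∈ PySem.Set.ofList dk, ¬ (!(y == k0)) = false := by
      intro y hy hb
      have : y = k0 := by simpa using hb
      exact h2 (this ▸ ((PySem.Set.mem_ofList _ _).mp hy))
    calc PySem.Set.discard (PySem.Set.ofList dk) k0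
        = (PySem.Set.ofList dk).filter (fun y => !(y == k0)) := rfl
      _ = PySem.Set.ofList dk := List.filter_eq_self.mpr (by
            intro y hy; cases hb : (!(y == k0)) with
            | true => rfl
            | false => exact absurd hb (this y hy))
  | cons x t ih =>
    have hx : x = k0 := h1 x (by simp)
    rw [List.cons_append, PySem.Set.ofList_cons, hx]
    have heq : ∀ (s : PySem.Set Int),
        PySem.Set.discard (k0 :: PySem.Set.discard s k0) k0 = PySem.Set.discard s k0 := by
      intro s
      show List.filter _ (k0 :: List.filter _ s) = List.filter _ s
      rw [List.filter_cons]
      simp [List.filter_filter]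
    rw [heq, ih (fun y hy => h1 y (by simp [hy]))]

-- dedup of a run of k0's followed by a k0-free tail
theorem dedup_cons_run (k0 : Int) (rk dk : List Int)
    (h1 : ∀ x ∈ rk, x = k0) (h2 : k0 ∉ dk) :
    PySem.List.dedup (k0 :: (rk ++ dk)) = k0 :: PySem.List.dedup dk := by
  simp only [PySem.List.dedup_eq_ofList, PySem.Set.ofList_cons]
  rw [discard_ofList_run k0 rk dk h1 h2]

-- dedup of a ≤-sorted list is strictly increasing
theorem dedup_pairwise_lt (m : List Int) (hm : m.Pairwise (· ≤ ·)) :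
    (PySem.List.dedup m).Pairwise (· < ·) := by
  induction m with
  | nil => simp [PySem.List.dedup]
  | cons x t ih =>
    rcases List.pairwise_cons.mp hm with ⟨hx, ht⟩
    simp only [PySem.List.dedup_eq_ofList, PySem.Set.ofList_cons] at *
    rw [List.pairwise_cons]
    constructor
    · intro y hy
      rcases (PySem.Set.mem_discard _ _ _).mp hy with ⟨hy1, hy2⟩
      exact lt_of_le_of_ne (hx y ((PySem.Set.mem_ofList _ _).mp hy1)) (Ne.symm hy2)
    · show (List.filter _ _).Pairwise _
      exact (ih ht).filter _

-- dedup of a ≤-sorted permutation of m' is sorted(set(m'))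
theorem dedup_sorted_key (m m' : List Int) (hperm : m.Perm m') (hm : m.Pairwise (· ≤ ·)) :
    PySem.List.dedup m = PySem.List.sorted (PySem.Set.ofList m') (fun x => x) false := by
  symm
  apply PySem.List.sorted_eq_of_perm_of_pairwise_lt
  · rw [List.perm_ext_iff_of_nodup (PySem.List.nodup_dedup m) (PySem.Set.nodup_ofList m')]
    intro a
    simp only [PySem.List.mem_dedup, PySem.Set.mem_ofList, hperm.mem_iff]
  · exact dedup_pairwise_lt m hm

-- B's grouping pass on a ≤-sorted list produces [k, Σ values keyed k] over the distinct keys in order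
theorem mergeRuns_spec (L : List (List Int)) (hp : L.Pairwise (fun a b => pvKey a ≤ pvKey b)) :
    mergeRuns L = (PySem.List.dedup (L.map pvKey)).map
      (fun k => [k, ((L.filter (fun p => pvKey p == k)).map pvVal).sum]) := by
  induction L using mergeRuns.induct with
  | case1 => simp [mergeRuns]
  | case2 item rest k0 ih =>
    rcases List.pairwise_cons.mp hp with ⟨hhd, hrest⟩
    have hk0 : k0 = pvKey item := rfl
    have hsplit : rest = rest.takeWhile (fun p => pvKey p == k0)
        ++ rest.dropWhile (fun p => pvKey p == k0) := (List.takeWhile_append_dropWhile).symm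
    generalize hrun : rest.takeWhile (fun p => pvKey p == k0) = run at *
    generalize hdrop : rest.dropWhile (fun p => pvKey p == k0) = drop at *
    have hfR : rest.filter (fun p => pvKey p == k0) = run := by
      rw [← hrun]
      exact filter_run k0 rest hrest (by rw [← hk0] at hhd; exact hhd)
    have hrunkeys : ∀ p ∈ run, pvKey p = k0 := by
      intro p hp'
      rw [← hrun] at hp'
      simpa using List.mem_takeWhile_imp hp'
    have hfrun : run.filter (fun p => pvKey p == k0) = run :=
      List.filter_eq_self.mpr (fun p hp' => by simp [hrunkeys p hp'])
    have hfdrop : drop.filter (fun p => pvKey p == k0) = [] := by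
      have h1 : run.filter (fun p => pvKey p == k0) ++ drop.filter (fun p => pvKey p == k0)
          = run ++ [] := by
        rw [List.append_nil, ← List.filter_append, ← hsplit, hfR]
      rw [hfrun] at h1
      exact List.append_cancel_left h1
    have hk0drop : ∀ p ∈ drop, pvKey p ≠ k0 := by
      intro p hp' he
      have : p ∈ drop.filter (fun p => pvKey p == k0) := List.mem_filter.mpr ⟨hp', by simp [he]⟩
      simp [hfdrop] at this
    have hdropsub : drop.Sublist rest := hdrop ▸ List.dropWhile_sublist _
    have hdp : drop.Pairwise (fun a b => pvKey a ≤ pvKey b) := hrest.sublist hdropsub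
    have hded : PySem.List.dedup ((item :: rest).map pvKey)
        = k0 :: PySem.List.dedup (drop.map pvKey) := by
      rw [List.map_cons, hsplit, List.map_append, ← hk0]
      exact dedup_cons_run k0 (run.map pvKey) (drop.map pvKey)
        (by intro x hx; rcases List.mem_map.mp hx with ⟨p, hp', rfl⟩; exact hrunkeys p hp')
        (by intro hx; rcases List.mem_map.mp hx with ⟨p, hp', he⟩; exact hk0drop p hp' he)
    have hstep : mergeRuns (item :: rest)
        = [k0, pvVal item + (run.map pvVal).sum] :: mergeRuns drop := by
      rw [mergeRuns, ← hrun, ← hdrop]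
    rw [hstep, ih hdp, hded, List.map_cons]
    congr 1
    · have hfL : (item :: rest).filter (fun p => pvKey p == k0) = item :: run := by
        rw [List.filter_cons, if_pos (by simp [← hk0]), hfR]
      rw [hfL, List.map_cons, List.sum_cons]
    · apply List.map_congr_left
      intro k hk
      have hkdrop : k ∈ drop.map pvKey := (PySem.List.mem_dedup _ _).mp hk
      have hkne : k ≠ k0 := by
        rcases List.mem_map.mp hkdrop with ⟨p, hp', rfl⟩
        exact hk0drop p hp'
      have hfL : (item :: rest).filter (fun p => pvKey p == k)
          = drop.filter (fun p => pvKey p == k) := by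
        rw [List.filter_cons, if_neg (by simp [← hk0]; exact fun h => hkne h.symm), hsplit,
          List.filter_append, List.filter_eq_nil_iff.mpr
            (fun p hp' hb => hkne (by have := hrunkeys p hp'; simp at hb; omega))]
        simp
      rw [hfL]

-- ===== VERDICT (by name: the statement is the Claim_ definition above) =====
theorem mergeSimilarItems_spec : Claim_equal_mergeSimilarItems := by
  intro items1 items2 _ _
  show mergeSimilarItems items1 items2 = mergeSimilarItems_alt items1 items2
  unfold mergeSimilarItems mergeSimilarItems_alt
  dsimp only
  rw [← List.foldl_append]
  set allItems := items1 ++ items2 with hall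
  set d2 := allItems.foldl (fun d item => d.modify (pvKey item) 0 (· + pvVal item)) PySem.Dict.empty with hd2
  have hkeys : d2.keys = PySem.Set.ofList (allItems.map pvKey) := by
    rw [hd2, PySem.Dict.keys_foldl_modify_key]
    simp [PySem.Set.update_nil_left]
  have hnd : d2.keys.Nodup := by
    rw [hkeys]; exact PySem.Set.nodup_ofList _
  have hval : ∀ k, d2.getD k 0 = ((allItems.filter (fun it => pvKey it == k)).map pvVal).sum := by
    intro k
    rw [hd2, getD_foldl_modify_sum]
    simp
  have hitems : d2.items = (PySem.Set.ofList (allItems.map pvKey)).map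
      (fun k => (k, ((allItems.filter (fun it => pvKey it == k)).map pvVal).sum)) := by
    rw [PySem.Dict.items_eq_map_keys d2 hnd 0, hkeys]
    apply List.map_congr_left
    intro k _
    rw [hval k]
  have hsorted : PySem.List.sorted d2.items (fun x => x.1) false
      = (PySem.List.sorted (PySem.Set.ofList (allItems.map pvKey)) (fun x => x) false).map
          (fun k => (k, ((allItems.filter (fun it => pvKey it == k)).map pvVal).sum)) := by
    apply PySem.List.sorted_eq_of_perm_of_pairwise_lt
    · rw [hitems]
      exact (PySem.List.sorted_perm _ _ _).map _
    · exact (PySem.List.sorted_ofList_pairwise_lt _).map _ (fun a b h => h)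
  rw [hsorted, PySem.List.foldl_append_singleton_eq_map]
  rw [mergeRuns_spec _ (PySem.List.sorted_pairwise allItems pvKey)]
  have hperm := PySem.List.sorted_perm allItems pvKey false
  have hded : PySem.List.dedup ((PySem.List.sorted allItems pvKey false).map pvKey)
      = PySem.List.sorted (PySem.Set.ofList (allItems.map pvKey)) (fun x => x) false := by
    apply dedup_sorted_key
    · exact hperm.map pvKey
    · exact PySem.List.sorted_map_key_pairwise allItems pvKey
  rw [hded, List.map_map]
  apply List.map_congr_left
  intro k _
  have : ((PySem.List.sorted allItems pvKey false).filter (fun p => pvKey p == k)).Perm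
      (allItems.filter (fun p => pvKey p == k)) := hperm.filter _
  simp [((this.map pvVal).sum_eq)]
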